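-- pv_equiv track=rewrite | github.com/gdownersigma/Coursework-Advanced-Data-Week-1 | coding_problems/challenge/main.py | find_longest_distance_max_load
-- ===== SOURCE A (Python) =====
-- def what_action(char: str) -> int:
--     """Returns 1 if pickup, 0 if nothing, -1 if put down."""
--     if char == '^':
--         return 1
--     elif char == 'v':
--         return -1
--     else:
--         return 0
--
-- def find_longest_distance_max_load(instructions: str) -> int:
--     """Returns the distance under maximum load"""
--     items_held = 0
--     distance_moved = 0
--     movements = []
--     for action in instructions:
--         if what_action(action) == 0:
--             distance_moved += 1
--         elif items_held == 0 and what_action(action) == -1: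
--             items_held = 0
--             continue
--         movements.append((items_held, distance_moved))
--         items_held += what_action(action)
--         distance_moved = 0
--
--     maximum_load = 0
--     max_distance_at_largest_load = 0
--     for movement in movements:
--         if movement[0] > maximum_load:
--             maximum_load = movement[0]
--
--     for movement in movements:
--         if movement[0] == maximum_load and max_distance_at_largest_load < movement[1]:
--             max_distance_at_largest_load = movement[1]
--
--     return max_distance_at_largest_load
-- ===== SOURCE B (Python) =====
-- def find_longest_distance_max_load(instructions: str) -> int:
--     """Single online pass with scalar accumulators: no movements list, no trailing scans."""
--     held = 0
--     max_load = 0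
--     best = 0
--     for ch in instructions:
--         if ch == 'v' and held == 0:
--             continue
--         d = 0 if ch in ('^', 'v') else 1
--         if held > max_load:
--             max_load, best = held, d
--         elif held == max_load:
--             best = max(best, d)
--         held += 1 if ch == '^' else (-1 if ch == 'v' else 0)
--     return best
-- ===== Notes on version B (the rewrite author's own statement) =====
-- stated objective: simpler
-- what changed: B drops A's materialized movements list and its two trailing scans, maintaining running max_load/best scalars in a single online pass over the instructions.
import Mathlib
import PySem

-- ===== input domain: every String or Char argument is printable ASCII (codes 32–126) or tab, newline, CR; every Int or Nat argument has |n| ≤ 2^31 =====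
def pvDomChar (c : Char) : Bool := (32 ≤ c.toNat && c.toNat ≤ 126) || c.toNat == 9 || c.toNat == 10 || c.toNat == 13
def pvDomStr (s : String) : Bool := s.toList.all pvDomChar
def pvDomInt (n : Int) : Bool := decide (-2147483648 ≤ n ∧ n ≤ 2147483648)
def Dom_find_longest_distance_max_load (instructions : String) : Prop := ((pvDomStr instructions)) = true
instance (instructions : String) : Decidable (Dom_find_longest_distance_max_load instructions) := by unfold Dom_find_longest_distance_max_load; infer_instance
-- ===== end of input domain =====

-- B replaces A's materialize-a-movements-list-then-scan-it-twice with one online pass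
-- keeping three scalar accumulators (objective: simpler).


-- ===== PORT A =====
def what_action (char : Char) : Int :=
  if char = '^' then 1
  else if char = 'v' then -1
  else 0

-- the body of A's first for-loop (state: items_held, distance_moved, movements)
def stepA (st : Int × Int × List (Int × Int)) (action : Char) : Int × Int × List (Int × Int) :=
  let items_held := st.1
  let distance_moved := st.2.1
  let movements := st.2.2
  let distance_moved := if what_action action = 0 then distance_moved + 1 else distance_moved
  if ¬ what_action action = 0 ∧ items_held = 0 ∧ what_action action = -1 then
    (items_held, distance_moved, movements)   -- continue
  else
    (items_held + what_action action, 0, movements ++ [(items_held, distance_moved)])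

-- the body of A's second for-loop
def loadStep (maximum_load : Int) (movement : Int × Int) : Int :=
  if movement.1 > maximum_load then movement.1 else maximum_load

-- the body of A's third for-loop
def bestStep (maximum_load : Int) (md : Int) (movement : Int × Int) : Int :=
  if movement.1 = maximum_load ∧ md < movement.2 then movement.2 else md

def find_longest_distance_max_load (instructions : String) : Int :=
  let s := instructions.toList.foldl stepA (0, 0, [])
  let movements := s.2.2
  let maximum_load := movements.foldl loadStep 0
  movements.foldl (bestStep maximum_load) 0

-- ===== PORT B =====
-- the body of B's single loop (state: held, max_load, best)
def stepB (st : Int × Int × Int) (ch : Char) : Int × Int × Int :=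
  let held := st.1
  let max_load := st.2.1
  let best := st.2.2
  if ch = 'v' ∧ held = 0 then st    -- continue
  else
    let d : Int := if ch = '^' ∨ ch = 'v' then 0 else 1
    let p : Int × Int :=
      if held > max_load then (held, d)
      else if held = max_load then (max_load, max best d)
      else (max_load, best)
    (held + (if ch = '^' then 1 else if ch = 'v' then -1 else 0), p.1, p.2)

def find_longest_distance_max_load_alt (instructions : String) : Int :=
  (instructions.toList.foldl stepB (0, 0, 0)).2.2

-- ===== PRECONDITION & SPEC =====
def Spec_find_longest_distance_max_load (instructions : String) (out : Int) : Prop := out = find_longest_distance_max_load_alt instructions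
instance (instructions : String) (out : Int) : Decidable (Spec_find_longest_distance_max_load instructions out) := by unfold Spec_find_longest_distance_max_load; infer_instance

-- ===== CLAIM (what is proved, stated in full; the proofs are below) =====
def Claim_equal_find_longest_distance_max_load : Prop := ∀ (instructions : String), Dom_find_longest_distance_max_load instructions → Spec_find_longest_distance_max_load instructions (find_longest_distance_max_load instructions)

-- ===== LEMMAS AND PROOFS =====

-- A's load scan never matches when no entry carries the target load
lemma bestFold_nomatch (t : Int) (m : List (Int × Int)) (a : Int)
    (h : ∀ e ∈ m, e.1 ≠ t) : m.foldl (bestStep t) a = a := by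
  induction m generalizing a with
  | nil => rfl
  | cons e m ih =>
    have he : e.1 ≠ t := h e (by simp)
    simp only [List.foldl_cons, bestStep, he, false_and, if_false]
    exact ih _ (fun x hx => h x (by simp [hx]))

-- the joint invariant: B's running (max_load, best) always equal A's two trailing
-- scans applied to the movements list built so far, and the held counters agree
lemma inv (cs : List Char) (h : Int) (m : List (Int × Int)) (ml bd : Int)
    (hml : ml = m.foldl loadStep 0)
    (hbd : bd = m.foldl (bestStep ml) 0)
    (hb : ∀ e ∈ m, e.1 ≤ ml) (h0 : 0 ≤ ml) :
    (cs.foldl stepB (h, ml, bd)).2.2 =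
      ((cs.foldl stepA (h, 0, m)).2.2).foldl
        (bestStep (((cs.foldl stepA (h, 0, m)).2.2).foldl loadStep 0)) 0 := by
  induction cs generalizing h m ml bd with
  | nil =>
    simp only [List.foldl_nil]
    rw [hbd, hml]
  | cons c cs ih =>
    simp only [List.foldl_cons]
    by_cases hskip : c = 'v' ∧ h = 0
    · -- both loops skip
      have hA : stepA (h, 0, m) c = (h, 0, m) := by
        simp [stepA, what_action, hskip.1, hskip.2]
      have hB : stepB (h, ml, bd) c = (h, ml, bd) := by
        simp [stepB, hskip.1, hskip.2]
      rw [hA, hB]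
      exact ih h m ml bd hml hbd hb h0
    · -- both loops append / update
      -- the move delta and the appended distance
      set wa : Int := what_action c with hwa
      set d : Int := if c = '^' ∨ c = 'v' then 0 else 1 with hd
      have hdist : (if what_action c = 0 then (0:Int) + 1 else 0) = d := by
        by_cases h1 : c = '^' <;> by_cases h2 : c = 'v' <;>
          simp [what_action, hd, h1, h2]
      have hA : stepA (h, 0, m) c = (h + wa, 0, m ++ [(h, d)]) := by
        have hnot : ¬ (¬ what_action c = 0 ∧ h = 0 ∧ what_action c = -1) := by
          rintro ⟨_, hh, hneg⟩
          have hcv : c = 'v' := by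
            by_contra hc
            by_cases h1 : c = '^' <;> simp [what_action, h1, hc] at hneg
          exact hskip ⟨hcv, hh⟩
        simp only [stepA, hwa]
        rw [hdist]
        simp [hnot]
      have hdelta : (if c = '^' then (1:Int) else if c = 'v' then -1 else 0) = wa := by
        simp [hwa, what_action]
      -- the new scan results on m ++ [(h, d)]
      have hml' : (m ++ [(h, d)]).foldl loadStep 0 = (if h > ml then h else ml) := by
        rw [List.foldl_append, ← hml]; rfl
      have hd01 : d = 0 ∨ d = 1 := by rw [hd]; split <;> simp
      have hbd' : (m ++ [(h, d)]).foldl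
          (bestStep (if h > ml then h else ml)) 0 =
          (if h > ml then d else if h = ml then max bd d else bd) := by
        rw [List.foldl_append]
        by_cases hgt : h > ml
        · simp only [hgt, if_pos]
          rw [bestFold_nomatch h m 0 (fun e he => by have := hb e he; omega)]
          simp only [List.foldl_cons, List.foldl_nil, bestStep]
          rcases hd01 with h01 | h01 <;> simp [h01]
        · simp only [hgt, if_false]
          rw [← hbd]
          by_cases heq : h = ml
          · simp only [heq, if_pos, List.foldl_cons, List.foldl_nil, bestStep]
            simp only [true_and]
            rw [max_def]
            split_ifs <;> omega
          · simp [heq, List.foldl_cons, bestStep]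
      have hB : stepB (h, ml, bd) c =
          (h + wa, (if h > ml then h else ml),
            (if h > ml then d else if h = ml then max bd d else bd)) := by
        simp only [stepB, hd, hdelta]
        rw [if_neg hskip]
        by_cases hgt : h > ml
        · simp [hgt]
        · by_cases heq : h = ml <;> simp [hgt, heq]
      rw [hA, hB]
      refine ih (h + wa) (m ++ [(h, d)]) _ _ hml'.symm hbd'.symm ?_ ?_
      · intro e he
        rcases List.mem_append.mp he with h1 | h1
        · have := hb e h1; split <;> omega
        · simp at h1; rw [h1]; simp; split <;> omega
      · split <;> omega

-- ===== VERDICT (by name: the statement is the Claim_ definition above) =====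
theorem find_longest_distance_max_load_spec : Claim_equal_find_longest_distance_max_load := by
  intro instructions _
  unfold Spec_find_longest_distance_max_load find_longest_distance_max_load
    find_longest_distance_max_load_alt
  exact (inv instructions.toList 0 [] 0 0 rfl rfl (by simp) le_rfl).symm
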